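-- pv_equiv track=rewrite | github.com/kh277/BOJ | 백준/Gold/20120. 호반우와 리듬게임/호반우와 리듬게임.py | solve
-- ===== SOURCE A (Python) =====
-- INF = 10**8
--
-- def solve(N, A):
--     # N이 2 이하인 경우
--     if N == 1:
--         return max(0, A[0])
--     elif N == 2:
--         return max(0, A[0], A[1], A[0]+2*A[1])
--
--     DP = [[-INF for _ in range(i+1)] for i in range(N+1)]
--     maxV = [-INF for _ in range(N+1)]
--
--     # 초기값 설정
--     DP[1] = [0, A[0]]
--     DP[2] = [0, A[1], A[0] + 2*A[1]]
--     maxV[1] = DP[1][1]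
--     maxV[2] = max(DP[2][1], DP[2][2])
--
--     # 이후 DP 처리
--     for cur in range(3, N+1):
--         DP[cur][0] = max(maxV[cur-1], maxV[cur-2])
--         for combo in range(1, cur+1):
--             DP[cur][combo] = DP[cur-1][combo-1] + combo*A[cur-1]
--             maxV[cur] = max(maxV[cur], DP[cur][combo])
--
--     return max(0, maxV[N], maxV[N-1], maxV[N-2])
-- ===== SOURCE B (Python) =====
-- INF = 10**8
--
-- def solve(N, A):
--     # Run-based DP: E[n] = best score of a scheme whose last hit note is n,
--     # found by scanning the hit-run ending at n backwards with an incremental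
--     # weighted sum; O(N) memory, no triangular table.
--     if N == 1:
--         return max(0, A[0])
--     E = [-INF] * (N + 1)
--     E[1] = A[0]
--     E[2] = max(A[1], A[0] + 2 * A[1])
--     for n in range(3, N + 1):
--         t = 0      # plain sum of the run A[l..n-1]
--         s = 0      # combo-weighted sum of the run starting at note l+1
--         best = -INF
--         for l in range(n - 1, -1, -1):
--             t += A[l]
--             s += t
--             base = 0 if l <= 2 else max(E[l - 1], E[l - 2])
--             best = max(best, base + s)
--         E[n] = best
--     return max(0, *E[max(1, N - 2):N + 1])
-- ===== Notes on version B (the rewrite author's own statement) =====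
-- stated objective: alternative
-- what changed: B replaces A's (N+1)-row triangular DP table over (position, combo) by a run-based DP: for each ending note it scans the hit-run backwards, maintaining the plain and combo-weighted run sums incrementally, keeping only a single 1-D best-score array (O(N) memory instead of O(N^2)).
import Mathlib
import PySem

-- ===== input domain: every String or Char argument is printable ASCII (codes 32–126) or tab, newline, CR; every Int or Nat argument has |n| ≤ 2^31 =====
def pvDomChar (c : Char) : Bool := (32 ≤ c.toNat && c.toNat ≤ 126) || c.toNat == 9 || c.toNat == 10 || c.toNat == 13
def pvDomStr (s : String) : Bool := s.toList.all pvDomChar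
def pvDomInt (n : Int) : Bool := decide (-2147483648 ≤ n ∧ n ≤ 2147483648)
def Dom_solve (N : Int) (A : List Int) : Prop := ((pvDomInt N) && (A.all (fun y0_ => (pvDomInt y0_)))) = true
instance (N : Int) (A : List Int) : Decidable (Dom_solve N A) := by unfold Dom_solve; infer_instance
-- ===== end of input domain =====

-- B replaces A's (N+1)-row triangular combo table by a run-based DP with two running
-- sums and a single 1-D array (objective: alternative algorithm, O(N) memory).

def pvINF : Int := 100000000

-- ===== PORT A =====
-- Literal port of Source A.  All list reads/writes are at in-range indices for inputs in
-- Pre_solve, so pyGetD's default and List.set are exact there.  The two loop bodies are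
-- named helpers (pvStepAIn = the 'for combo' body, pvStepA = the 'for cur' body); the
-- row DP[cur], written cell by cell left to right in Python, is built by appending the
-- same values and stored once.
def pvStepAIn (A prev : List Int) (cur : Int) (rm : List Int × Int) (combo : Int) : List Int × Int :=
  -- DP[cur][combo] = DP[cur-1][combo-1] + combo*A[cur-1]; maxV[cur] = max(maxV[cur], DP[cur][combo])
  let v := PySem.List.pyGetD prev (combo-1) (-pvINF) + combo * PySem.List.pyGetD A (cur-1) 0
  (rm.1 ++ [v], max rm.2 v)

def pvStepA (A : List Int) (st : List (List Int) × List Int) (cur : Int) : List (List Int) × List Int :=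
  -- DP[cur][0] = max(maxV[cur-1], maxV[cur-2]);  for combo in range(1, cur+1): …
  let prev := PySem.List.pyGetD st.1 (cur-1) []
  let dp0 := max (PySem.List.pyGetD st.2 (cur-1) (-pvINF)) (PySem.List.pyGetD st.2 (cur-2) (-pvINF))
  let inner := (PySem.List.pyRange 1 (cur+1) 1).foldl (pvStepAIn A prev cur)
      ([dp0], PySem.List.pyGetD st.2 cur (-pvINF))
  (st.1.set cur.toNat inner.1, st.2.set cur.toNat inner.2)

def pvInitA (A : List Int) (N : Int) : List (List Int) × List Int :=
  -- DP/maxV comprehensions, then DP[1], DP[2], maxV[1], maxV[2]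
  let DP0 : List (List Int) :=
    (PySem.List.pyRange 0 (N+1) 1).map
      (fun i => (PySem.List.pyRange 0 (i+1) 1).map (fun _ => (-pvINF : Int)))
  let maxV0 : List Int := (PySem.List.pyRange 0 (N+1) 1).map (fun _ => (-pvINF : Int))
  let DP2 := (DP0.set 1 [0, PySem.List.pyGetD A 0 0]).set 2
      [0, PySem.List.pyGetD A 1 0,
       PySem.List.pyGetD A 0 0 + 2 * PySem.List.pyGetD A 1 0]
  let maxV2 := (maxV0.set 1
      (PySem.List.pyGetD (PySem.List.pyGetD DP2 1 []) 1 (-pvINF))).set 2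
      (max (PySem.List.pyGetD (PySem.List.pyGetD DP2 2 []) 1 (-pvINF))
           (PySem.List.pyGetD (PySem.List.pyGetD DP2 2 []) 2 (-pvINF)))
  (DP2, maxV2)

def solve (N : Int) (A : List Int) : Int :=
  if N = 1 then
    max 0 (PySem.List.pyGetD A 0 0)
  else if N = 2 then
    max (max (max 0 (PySem.List.pyGetD A 0 0)) (PySem.List.pyGetD A 1 0))
        (PySem.List.pyGetD A 0 0 + 2 * PySem.List.pyGetD A 1 0)
  else
    let st := (PySem.List.pyRange 3 (N+1) 1).foldl (pvStepA A) (pvInitA A N)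
    max (max (max 0 (PySem.List.pyGetD st.2 N (-pvINF)))
             (PySem.List.pyGetD st.2 (N-1) (-pvINF)))
        (PySem.List.pyGetD st.2 (N-2) (-pvINF))

-- ===== PORT B =====
-- Literal port of Source B (run-based DP; E[n] = best score whose last hit is note n).
-- The loop bodies are the named helpers pvStepBIn (the 'for l' body) and pvStepB.
def pvStepBIn (A E : List Int) (ts : Int × Int × Int) (l : Int) : Int × Int × Int :=
  -- t += A[l]; s += t; base = 0 if l <= 2 else max(E[l-1], E[l-2]); best = max(best, base+s)
  let t := ts.1 + PySem.List.pyGetD A l 0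
  let s := ts.2.1 + t
  let base := if l ≤ 2 then (0:Int)
              else max (PySem.List.pyGetD E (l-1) (-pvINF)) (PySem.List.pyGetD E (l-2) (-pvINF))
  (t, s, max ts.2.2 (base + s))

def pvStepB (A : List Int) (E : List Int) (n : Int) : List Int :=
  let fin := (PySem.List.pyRange (n-1) (-1) (-1)).foldl (pvStepBIn A E) (0, 0, -pvINF)
  E.set n.toNat fin.2.2

def pvInitB (A : List Int) (N : Int) : List Int :=
  -- E = [-INF] * (N+1); E[1] = A[0]; E[2] = max(A[1], A[0] + 2*A[1])
  ((List.replicate (N+1).toNat (-pvINF)).set 1 (PySem.List.pyGetD A 0 0)).set 2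
    (max (PySem.List.pyGetD A 1 0)
         (PySem.List.pyGetD A 0 0 + 2 * PySem.List.pyGetD A 1 0))

def solve_alt (N : Int) (A : List Int) : Int :=
  if N = 1 then
    max 0 (PySem.List.pyGetD A 0 0)
  else
    let E := (PySem.List.pyRange 3 (N+1) 1).foldl (pvStepB A) (pvInitB A N)
    -- max(0, *E[max(1, N-2):N+1])
    (PySem.List.slice E (some (max 1 (N-2))) (some (N+1))).foldl max 0

-- ===== PRECONDITION & SPEC =====
-- Pre_solve is exactly where the Python A returns: it indexes A[0..N-1] and assigns
-- DP[1], DP[2], so it raises IndexError unless 1 ≤ N ≤ len(A).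
def Pre_solve (N : Int) (A : List Int) : Prop := 1 ≤ N ∧ N ≤ A.length
instance (N : Int) (A : List Int) : Decidable (Pre_solve N A) := by unfold Pre_solve; infer_instance
def pvWitness_solve : Int × List Int := (4, [3, -1, 2, 5])

def Spec_solve (N : Int) (A : List Int) (out : Int) : Prop := out = solve_alt N A
instance (N : Int) (A : List Int) (out : Int) : Decidable (Spec_solve N A out) := by unfold Spec_solve; infer_instance

-- ===== CLAIM (what is proved, stated in full; the proofs are below) =====
def Claim_equal_solve : Prop := ∀ (N : Int) (A : List Int), Dom_solve N A → Pre_solve N A → Spec_solve N A (solve N A)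

-- ===== LEMMAS AND PROOFS =====

-- A[i] (in range wherever the programs read it under Pre_solve)
def pvGI (A : List Int) (i : Nat) : Int := A.getD i 0

-- sum of A[l], A[l+1], …, A[l+k-1]
def pvTS (A : List Int) (l : Nat) : Nat → Int
  | 0 => 0
  | k+1 => pvGI A l + pvTS A (l+1) k

-- combo-weighted sum of the run A[l..l+k-1]: 1*A[l] + 2*A[l+1] + … + k*A[l+k-1]
def pvWs (A : List Int) (l : Nat) : Nat → Int
  | 0 => 0
  | k+1 => pvWs A l k + ((k:Int)+1) * pvGI A (l+k)

-- reference value: pvEv A n = A's maxV[n] = B's E[n]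
def pvEv (A : List Int) (n : Nat) : Int :=
  if n = 0 then -pvINF
  else if n = 1 then pvGI A 0
  else if n = 2 then max (pvGI A 1) (pvGI A 0 + 2 * pvGI A 1)
  else
    (List.range n).attach.foldl
      (fun b i =>
        max b ((if n-1-i.1 ≤ 2 then 0 else max (pvEv A (n-1-i.1-1)) (pvEv A (n-1-i.1-2)))
                 + pvWs A (n-1-i.1) (n - (n-1-i.1))))
      (-pvINF)
termination_by n
decreasing_by
  all_goals have h := i.2; simp [List.mem_range] at h; omega

def pvBaseF (A : List Int) (l : Nat) : Int :=
  if l ≤ 2 then 0 else max (pvEv A (l-1)) (pvEv A (l-2))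

def pvCand (A : List Int) (n c : Nat) : Int := pvBaseF A (n - c) + pvWs A (n - c) c

def pvRow (A : List Int) (m : Nat) : List Int :=
  pvBaseF A m :: (List.range m).map (fun i => pvCand A m (i+1))

-- invariant for A's maxV list and B's E list after processing rounds 3..m
def pvMvOK (A : List Int) (N : Int) (m : Nat) (L : List Int) : Prop :=
  L.length = (N+1).toNat ∧
  ∀ k, k < (N+1).toNat →
    L.getD k (-pvINF) = if 1 ≤ k ∧ k ≤ m then pvEv A k else -pvINF

lemma pvTS_succ_right (A : List Int) (l k : Nat) :
    pvTS A l (k+1) = pvTS A l k + pvGI A (l+k) := by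
  induction k generalizing l with
  | zero => simp [pvTS]
  | succ k ih =>
    have L : pvTS A l (k+1+1) = pvGI A l + pvTS A (l+1) (k+1) := rfl
    have R : pvTS A l (k+1) = pvGI A l + pvTS A (l+1) k := rfl
    rw [L, ih (l+1), R]
    have e : l+1+k = l+(k+1) := by omega
    rw [e]; ring

lemma pvWs_shift (A : List Int) (l k : Nat) :
    pvWs A l (k+1) = pvWs A (l+1) k + pvTS A l (k+1) := by
  induction k with
  | zero => simp [pvWs, pvTS]
  | succ k ih =>
    have L : pvWs A l (k+1+1) = pvWs A l (k+1) + (((k+1:Nat):Int)+1) * pvGI A (l+(k+1)) := rfl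
    have R : pvWs A (l+1) (k+1) = pvWs A (l+1) k + ((k:Int)+1) * pvGI A (l+1+k) := rfl
    rw [L, ih, R, pvTS_succ_right A l (k+1)]
    have e : l+1+k = l+(k+1) := by omega
    rw [e]; push_cast; ring

lemma pvEv_eq (A : List Int) (n : Nat) (hn : 3 ≤ n) :
    pvEv A n = (List.range n).foldl (fun b i => max b (pvCand A n (i+1))) (-pvINF) := by
  rw [pvEv]
  rw [if_neg (by omega), if_neg (by omega), if_neg (by omega)]
  rw [@List.foldl_attach Nat Int (List.range n)
        (fun b x => max b ((if n-1-x ≤ 2 then 0 else max (pvEv A (n-1-x-1)) (pvEv A (n-1-x-2)))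
                 + pvWs A (n-1-x) (n - (n-1-x)))) (-pvINF)]
  apply PySem.List.foldl_congr_mem
  intro acc x hx
  simp only [List.mem_range] at hx
  have e2 : n-(n-1-x) = x+1 := by omega
  have e1 : n-1-x = n-(x+1) := by omega
  rw [e2, e1]
  simp only [pvCand, pvBaseF]

lemma pvCand_shift (A : List Int) (m c : Nat) (h1 : 1 ≤ c) (h2 : c ≤ m+1) :
    pvCand A (m+1) c = (if c = 1 then pvBaseF A m else pvCand A m (c-1)) + (c:Int) * pvGI A m := by
  cases c with
  | zero => omega
  | succ c' =>
    by_cases hc : c' = 0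
    · subst hc
      simp [pvCand, pvBaseF, pvWs, pvGI]
    · have e : m+1-(c'+1) = m - c' := by omega
      have L : pvWs A (m-c') (c'+1) = pvWs A (m-c') c' + ((c':Int)+1)*pvGI A ((m-c')+c') := rfl
      have e2 : (m-c')+c' = m := by omega
      rw [pvCand, e, L, e2, if_neg (by omega), pvCand]
      have e3 : c'+1-1 = c' := by omega
      rw [e3]; push_cast; ring

lemma pvRow_getD (A : List Int) (m j : Nat) (hj : j ≤ m) :
    (pvRow A m).getD j (-pvINF) = if j = 0 then pvBaseF A m else pvCand A m j := by
  cases j with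
  | zero => simp [pvRow, List.getD]
  | succ j' =>
    have hj' : j' < m := by omega
    simp [pvRow, List.getD, List.getElem?_map, List.getElem?_range, hj']

lemma pvGetD_set (L : List Int) (i k : Nat) (v d : Int) (hi : i < L.length) :
    (L.set i v).getD k d = if k = i then v else L.getD k d := by
  simp only [List.getD, List.getElem?_set]
  split_ifs with h1 h2 <;> first | rfl | (try simp) <;> omega

lemma pvGetD_set2 (L : List (List Int)) (i k : Nat) (v d : List Int) (hi : i < L.length) :
    (L.set i v).getD k d = if k = i then v else L.getD k d := by
  simp only [List.getD, List.getElem?_set]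
  split_ifs with h1 h2 <;> first | rfl | (try simp) <;> omega

lemma pvInnerA (A : List Int) (m : Nat) (j : Nat) (hj : j ≤ m+1) :
    (PySem.List.pyRange 1 ((j:Int)+1) 1).foldl (pvStepAIn A (pvRow A m) (((m+1:Nat)):Int))
        ([pvBaseF A (m+1)], -pvINF)
      = (pvBaseF A (m+1) :: (List.range j).map (fun i => pvCand A (m+1) (i+1)),
         (List.range j).foldl (fun b i => max b (pvCand A (m+1) (i+1))) (-pvINF)) := by
  induction j with
  | zero =>
    rw [show ((0:Nat):Int)+1 = 1 by norm_num, PySem.List.pyRange_one_eq_nil le_rfl]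
    simp
  | succ j ih =>
    have hjm : j ≤ m := by omega
    have hr : PySem.List.pyRange 1 (((j+1:Nat):Int)+1) 1
        = PySem.List.pyRange 1 ((j:Int)+1) 1 ++ [(j:Int)+1] := by
      rw [show (((j+1:Nat):Int))+1 = ((j:Int)+1)+1 by push_cast; ring]
      exact PySem.List.pyRange_one_succ_right (by omega)
    rw [hr, List.foldl_append, ih (by omega)]
    have hv : PySem.List.pyGetD (pvRow A m) ((j:Int)+1-1) (-pvINF)
        + ((j:Int)+1) * PySem.List.pyGetD A ((((m+1:Nat)):Int)-1) 0 = pvCand A (m+1) (j+1) := by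
      rw [show (j:Int)+1-1 = ((j:Nat):Int) by ring, show (((m+1:Nat)):Int)-1 = ((m:Nat):Int) by push_cast; ring]
      rw [PySem.List.pyGetD_natCast, PySem.List.pyGetD_natCast]
      rw [pvRow_getD A m j hjm]
      rw [pvCand_shift A m (j+1) (by omega) (by omega)]
      have e2 : j+1-1 = j := by omega
      rw [e2]
      by_cases h0 : j = 0
      · subst h0; rw [if_pos rfl, if_pos (by omega)]; push_cast; simp [pvGI]
      · rw [if_neg h0, if_neg (by omega)]; push_cast; simp [pvGI]
    simp only [List.foldl_cons, List.foldl_nil, pvStepAIn, hv]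
    rw [List.range_succ]
    simp [List.foldl_append]


lemma pvInnerB (A E : List Int) (N : Int) (n : Nat)
    (hE : ∀ k, 1 ≤ k → k + 2 ≤ n → E.getD k (-pvINF) = pvEv A k) :
    ∀ (l0 : Nat), l0 ≤ n → ∀ b0 : Int,
    (PySem.List.pyRange ((l0:Int)-1) (-1) (-1)).foldl (pvStepBIn A E)
        (pvTS A l0 (n-l0), pvWs A l0 (n-l0), b0)
      = (pvTS A 0 n, pvWs A 0 n,
         (List.range l0).foldl (fun b j => max b (pvCand A n (n-l0+(j+1)))) b0) := by
  intro l0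
  induction l0 with
  | zero =>
    intro _ b0
    rw [show ((0:Nat):Int)-1 = -1 by norm_num, PySem.List.pyRange_neg_one_eq_nil le_rfl]
    simp
  | succ l0 ih =>
    intro hl b0
    have hr : PySem.List.pyRange (((l0+1:Nat):Int)-1) (-1) (-1)
        = ((l0:Nat):Int) :: PySem.List.pyRange (((l0:Nat):Int)-1) (-1) (-1) := by
      rw [show (((l0+1:Nat):Int))-1 = ((l0:Nat):Int) by push_cast; ring]
      exact PySem.List.pyRange_neg_one_cons (by omega)
    rw [hr, List.foldl_cons]
    have e2 : (n-(l0+1))+1 = n-l0 := by omega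
    have ht : pvTS A (l0+1) (n-(l0+1)) + pvGI A l0 = pvTS A l0 (n-l0) := by
      have h0 : pvTS A l0 ((n-(l0+1))+1) = pvGI A l0 + pvTS A (l0+1) (n-(l0+1)) := rfl
      rw [e2] at h0; omega
    have hs : pvWs A (l0+1) (n-(l0+1)) + pvTS A l0 (n-l0) = pvWs A l0 (n-l0) := by
      have h0 := pvWs_shift A l0 (n-(l0+1))
      rw [e2] at h0; omega
    have hbase : (if ((l0:Nat):Int) ≤ 2 then (0:Int)
        else max (PySem.List.pyGetD E (((l0:Nat):Int)-1) (-pvINF))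
                 (PySem.List.pyGetD E (((l0:Nat):Int)-2) (-pvINF))) = pvBaseF A l0 := by
      by_cases hl2 : l0 ≤ 2
      · rw [if_pos (by exact_mod_cast hl2), pvBaseF, if_pos hl2]
      · rw [if_neg (by exact_mod_cast hl2), pvBaseF, if_neg hl2]
        rw [show ((l0:Nat):Int)-1 = (((l0-1:Nat)):Int) by omega,
            show ((l0:Nat):Int)-2 = (((l0-2:Nat)):Int) by omega,
            PySem.List.pyGetD_natCast, PySem.List.pyGetD_natCast,
            hE (l0-1) (by omega) (by omega), hE (l0-2) (by omega) (by omega)]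
    have hcand : pvBaseF A l0 + pvWs A l0 (n-l0) = pvCand A n (n-l0) := by
      rw [pvCand, show n-(n-l0) = l0 by omega]
    have hgi : A.getD l0 0 = pvGI A l0 := rfl
    simp only [pvStepBIn, PySem.List.pyGetD_natCast, hgi, ht, hs, hbase, hcand]
    rw [ih (by omega) (max b0 (pvCand A n (n-l0)))]
    have hff : (fun (b:Int) (j:Nat) => max b (pvCand A n (n-(l0+1)+(j+1+1))))
        = (fun b j => max b (pvCand A n (n-l0+(j+1)))) := by
      funext b j
      have e : n-(l0+1)+(j+1+1) = n-l0+(j+1) := by omega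
      rw [e]
    have e3 : n-(l0+1)+(0+1) = n-l0 := by omega
    simp only [List.range_succ_eq_map, List.foldl_cons, List.foldl_map]
    rw [hff, show n-(l0+1)+(0+1) = n-l0 by omega]


lemma pvWs_one (A : List Int) (l : Nat) : pvWs A l 1 = pvGI A l := by
  show pvWs A l 0 + (((0:Nat):Int)+1)*pvGI A (l+0) = pvGI A l
  simp [pvWs]

lemma pvWs_two (A : List Int) (l : Nat) : pvWs A l 2 = pvGI A l + 2 * pvGI A (l+1) := by
  show pvWs A l 1 + (((1:Nat):Int)+1)*pvGI A (l+1) = _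
  rw [pvWs_one]; push_cast; ring

lemma pvEv_one (A : List Int) : pvEv A 1 = pvGI A 0 := by rw [pvEv]; norm_num

lemma pvEv_two (A : List Int) : pvEv A 2 = max (pvGI A 1) (pvGI A 0 + 2 * pvGI A 1) := by
  rw [pvEv]; norm_num

lemma pvRow_two (A : List Int) : pvRow A 2 = [0, pvGI A 1, pvGI A 0 + 2 * pvGI A 1] := by
  simp [pvRow, List.range_succ, pvCand, pvBaseF, pvWs_one, pvWs_two]

lemma pvStepA_eq (A : List Int) (N : Int) (hN : 3 ≤ N) (m : Nat) (hm : 2 ≤ m)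
    (hmN : (m:Int)+1 ≤ N) (st : List (List Int) × List Int)
    (h1 : st.1.getD m [] = pvRow A m) (h2 : st.1.length = (N+1).toNat)
    (h3 : pvMvOK A N m st.2) :
    pvStepA A st (((m+1:Nat)):Int)
      = (st.1.set (m+1) (pvRow A (m+1)), st.2.set (m+1) (pvEv A (m+1))) := by
  obtain ⟨hlen2, hval⟩ := h3
  simp only [pvStepA]
  rw [show ((((m+1:Nat)):Int))-1 = ((m:Nat):Int) by push_cast; ring,
      show ((((m+1:Nat)):Int))-2 = (((m-1:Nat)):Int) by omega,
      PySem.List.pyGetD_natCast, PySem.List.pyGetD_natCast, PySem.List.pyGetD_natCast,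
      PySem.List.pyGetD_natCast, h1]
  rw [hval m (by omega), hval (m-1) (by omega), hval (m+1) (by omega)]
  rw [if_pos ⟨by omega, by omega⟩, if_pos ⟨by omega, by omega⟩, if_neg (by omega)]
  have hdp0 : max (pvEv A m) (pvEv A (m-1)) = pvBaseF A (m+1) := by
    rw [pvBaseF, if_neg (by omega), show m+1-1 = m by omega, show m+1-2 = m-1 by omega]
  rw [hdp0, pvInnerA A m (m+1) le_rfl, pvEv_eq A (m+1) (by omega)]
  rw [show ((((m+1:Nat)):Int)).toNat = m+1 by simp]
  rfl

lemma pvStepB_eq (A : List Int) (N : Int) (hN : 3 ≤ N) (m : Nat) (hm : 2 ≤ m)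
    (hmN : (m:Int)+1 ≤ N) (E : List Int) (h3 : pvMvOK A N m E) :
    pvStepB A E (((m+1:Nat)):Int) = E.set (m+1) (pvEv A (m+1)) := by
  obtain ⟨hlen2, hval⟩ := h3
  simp only [pvStepB]
  have hE : ∀ k, 1 ≤ k → k + 2 ≤ m+1 → E.getD k (-pvINF) = pvEv A k := by
    intro k hk1 hk2
    rw [hval k (by omega), if_pos ⟨hk1, by omega⟩]
  have key := pvInnerB A E N (m+1) hE (m+1) le_rfl (-pvINF)
  rw [Nat.sub_self] at key
  rw [show pvTS A (m+1) 0 = 0 from rfl, show pvWs A (m+1) 0 = 0 from rfl] at key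
  rw [key]
  have hg : (fun (b:Int) (j:Nat) => max b (pvCand A (m+1) (0+(j+1))))
      = (fun b j => max b (pvCand A (m+1) (j+1))) := by
    funext b j; rw [Nat.zero_add]
  rw [hg, ← pvEv_eq A (m+1) (by omega)]
  rw [show ((((m+1:Nat)):Int)).toNat = m+1 by simp]

lemma pvInitA_len (A : List Int) (N : Int) :
    (pvInitA A N).1.length = (N+1).toNat ∧ (pvInitA A N).2.length = (N+1).toNat := by
  simp [pvInitA, PySem.List.length_pyRange_one]

lemma pvConstMapGetD (N : Int) (k : Nat) :
    (((PySem.List.pyRange 0 (N+1) 1).map (fun _ => (-pvINF:Int))).getD k (-pvINF)) = -pvINF := by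
  simp only [List.getD, List.getElem?_map]
  cases h : (PySem.List.pyRange 0 (N+1) 1)[k]? <;> simp

lemma pvInitA_DP2 (A : List Int) (N : Int) (hN : 3 ≤ N) :
    (pvInitA A N).1.getD 2 [] = pvRow A 2 := by
  have hl : ((PySem.List.pyRange 0 (N+1) 1).map
      (fun i => (PySem.List.pyRange 0 (i+1) 1).map (fun _ => (-pvINF : Int)))).length
      = (N+1).toNat := by simp [PySem.List.length_pyRange_one]
  simp only [pvInitA, PySem.List.pyGetD_ofNat']
  rw [pvGetD_set2 _ _ _ _ _ (by simp only [List.length_set, hl]; omega), if_pos rfl, pvRow_two]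
  rfl

lemma pvInitA_mvOK (A : List Int) (N : Int) (hN : 3 ≤ N) :
    pvMvOK A N 2 (pvInitA A N).2 := by
  have hDP2g : ((((PySem.List.pyRange 0 (N+1) 1).map
      (fun i => (PySem.List.pyRange 0 (i+1) 1).map (fun _ => (-pvINF : Int)))).set 1
        [0, A.getD 0 0]).set 2
        [0, A.getD 1 0, A.getD 0 0 + 2 * A.getD 1 0]).getD 2 []
      = pvRow A 2 := by
    simpa only [pvInitA, PySem.List.pyGetD_ofNat'] using pvInitA_DP2 A N hN
  have hl : ((PySem.List.pyRange 0 (N+1) 1).map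
      (fun i => (PySem.List.pyRange 0 (i+1) 1).map (fun _ => (-pvINF : Int)))).length
      = (N+1).toNat := by simp [PySem.List.length_pyRange_one]
  have hl0 : ((PySem.List.pyRange 0 (N+1) 1).map (fun _ => (-pvINF:Int))).length
      = (N+1).toNat := by simp [PySem.List.length_pyRange_one]
  have hDP1 : ((((PySem.List.pyRange 0 (N+1) 1).map
      (fun i => (PySem.List.pyRange 0 (i+1) 1).map (fun _ => (-pvINF : Int)))).set 1
        [0, A.getD 0 0]).set 2
        [0, A.getD 1 0, A.getD 0 0 + 2 * A.getD 1 0]).getD 1 []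
      = [0, A.getD 0 0] := by
    rw [pvGetD_set2 _ _ _ _ _ (by simp only [List.length_set, hl]; omega), if_neg (by omega),
        pvGetD_set2 _ _ _ _ _ (by rw [hl]; omega), if_pos rfl]
  constructor
  · simp only [pvInitA, PySem.List.pyGetD_ofNat', List.length_set]
    exact hl0
  · intro k hk
    simp only [pvInitA, PySem.List.pyGetD_ofNat']
    rw [pvGetD_set _ _ _ _ _ (by simp only [List.length_set, hl0]; omega),
        pvGetD_set _ _ _ _ _ (by rw [hl0]; omega)]
    by_cases h2 : k = 2
    · subst h2
      rw [if_pos rfl, if_pos ⟨by omega, by omega⟩, pvEv_two, hDP2g, pvRow_two]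
      rfl
    · rw [if_neg h2]
      by_cases h1 : k = 1
      · subst h1
        rw [if_pos rfl, if_pos ⟨by omega, by omega⟩, pvEv_one, hDP1]
        rfl
      · rw [if_neg h1, if_neg (by omega), pvConstMapGetD]

lemma pvInitB_mvOK (A : List Int) (N : Int) (hN : 3 ≤ N) :
    pvMvOK A N 2 (pvInitB A N) := by
  constructor
  · simp [pvInitB]
  · intro k hk
    simp only [pvInitB, PySem.List.pyGetD_ofNat']
    rw [pvGetD_set _ _ _ _ _ (by simp; omega), pvGetD_set _ _ _ _ _ (by simp; omega)]
    by_cases h2 : k = 2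
    · subst h2
      rw [if_pos rfl, if_pos ⟨by omega, by omega⟩, pvEv_two]
      rfl
    · rw [if_neg h2]
      by_cases h1 : k = 1
      · subst h1
        rw [if_pos rfl, if_pos ⟨by omega, by omega⟩, pvEv_one]
        rfl
      · rw [if_neg h1, if_neg (by omega)]
        exact List.getD_replicate _ (by omega)

lemma pvOuterA (A : List Int) (N : Int) (hN : 3 ≤ N) (m : Nat) (hm : 2 ≤ m) (hmN : (m:Int) ≤ N) :
    ((PySem.List.pyRange 3 ((m:Int)+1) 1).foldl (pvStepA A) (pvInitA A N)).1.getD m [] = pvRow A m ∧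
    ((PySem.List.pyRange 3 ((m:Int)+1) 1).foldl (pvStepA A) (pvInitA A N)).1.length = (N+1).toNat ∧
    pvMvOK A N m ((PySem.List.pyRange 3 ((m:Int)+1) 1).foldl (pvStepA A) (pvInitA A N)).2 := by
  obtain ⟨m', rfl⟩ : ∃ m', m = m'+2 := ⟨m-2, by omega⟩
  clear hm
  induction m' with
  | zero =>
    rw [show (((0+2:Nat)):Int)+1 = 3 by norm_num, PySem.List.pyRange_one_eq_nil le_rfl]
    simp only [List.foldl_nil]
    exact ⟨pvInitA_DP2 A N hN, (pvInitA_len A N).1, pvInitA_mvOK A N hN⟩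
  | succ m' ih =>
    obtain ⟨i1, i2, i3⟩ := ih (by push_cast at hmN ⊢; omega)
    have hr : PySem.List.pyRange 3 ((((m'+1+2:Nat)):Int)+1) 1
        = PySem.List.pyRange 3 ((((m'+2:Nat)):Int)+1) 1 ++ [(((m'+2+1:Nat)):Int)] := by
      rw [show ((((m'+1+2:Nat)):Int))+1 = ((((m'+2:Nat)):Int)+1)+1 by push_cast; ring,
          PySem.List.pyRange_one_succ_right (by push_cast; omega)]
      norm_num
    rw [hr, List.foldl_append, List.foldl_cons, List.foldl_nil]
    rw [pvStepA_eq A N hN (m'+2) (by omega) (by push_cast at hmN ⊢; omega) _ i1 i2 i3]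
    refine ⟨?_, ?_, ?_, ?_⟩
    · rw [show m'+1+2 = m'+2+1 by omega]
      rw [pvGetD_set2 _ _ _ _ _ (by rw [i2]; omega), if_pos rfl]
    · rw [List.length_set]; exact i2
    · rw [List.length_set]; exact i3.1
    · intro k hk
      rw [pvGetD_set _ _ _ _ _ (by rw [i3.1]; omega)]
      by_cases h3 : k = m'+2+1
      · subst h3
        rw [if_pos rfl, if_pos ⟨by omega, by omega⟩]
      · rw [if_neg h3, i3.2 k hk]
        split_ifs <;> first | rfl | omega

lemma pvOuterB (A : List Int) (N : Int) (hN : 3 ≤ N) (m : Nat) (hm : 2 ≤ m) (hmN : (m:Int) ≤ N) :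
    pvMvOK A N m ((PySem.List.pyRange 3 ((m:Int)+1) 1).foldl (pvStepB A) (pvInitB A N)) := by
  obtain ⟨m', rfl⟩ : ∃ m', m = m'+2 := ⟨m-2, by omega⟩
  clear hm
  induction m' with
  | zero =>
    rw [show (((0+2:Nat)):Int)+1 = 3 by norm_num, PySem.List.pyRange_one_eq_nil le_rfl]
    simp only [List.foldl_nil]
    exact pvInitB_mvOK A N hN
  | succ m' ih =>
    have i3 := ih (by push_cast at hmN ⊢; omega)
    have hr : PySem.List.pyRange 3 ((((m'+1+2:Nat)):Int)+1) 1
        = PySem.List.pyRange 3 ((((m'+2:Nat)):Int)+1) 1 ++ [(((m'+2+1:Nat)):Int)] := by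
      rw [show ((((m'+1+2:Nat)):Int))+1 = ((((m'+2:Nat)):Int)+1)+1 by push_cast; ring,
          PySem.List.pyRange_one_succ_right (by push_cast; omega)]
      norm_num
    rw [hr, List.foldl_append, List.foldl_cons, List.foldl_nil]
    rw [pvStepB_eq A N hN (m'+2) (by omega) (by push_cast at hmN ⊢; omega) _ i3]
    constructor
    · rw [List.length_set]; exact i3.1
    · intro k hk
      rw [pvGetD_set _ _ _ _ _ (by rw [i3.1]; omega)]
      by_cases h3 : k = m'+2+1
      · subst h3
        rw [if_pos rfl, if_pos ⟨by omega, by omega⟩]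
      · rw [if_neg h3, i3.2 k hk]
        split_ifs <;> first | rfl | omega

-- ===== VERDICT (by name: the statement is the Claim_ definition above) =====
theorem solve_spec : Claim_equal_solve := by
  intro N A _ hpre
  unfold Spec_solve
  obtain ⟨hp1, hplen⟩ := hpre
  by_cases hN1 : N = 1
  · subst hN1
    simp [solve, solve_alt]
  by_cases hN2 : N = 2
  · subst hN2
    rcases A with _ | ⟨a, _ | ⟨b, t⟩⟩
    · simp at hplen
    · simp at hplen
    · rw [solve, solve_alt]
      rw [if_neg (by norm_num), if_pos rfl, if_neg (by norm_num)]
      rw [show ((2:Int)+1) = 3 by norm_num, PySem.List.pyRange_one_eq_nil le_rfl]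
      simp only [List.foldl_nil, pvInitB]
      simp [PySem.List.pyGetD_ofNat', PySem.List.slice, PySem.List.clampIdx, List.foldl]
  · have hN3 : 3 ≤ N := by omega
    obtain ⟨nn, rfl⟩ : ∃ nn : Nat, N = (nn:Int) := ⟨N.toNat, by omega⟩
    have hnn3 : 3 ≤ nn := by exact_mod_cast hN3
    simp only [solve, solve_alt]
    rw [if_neg hN1, if_neg hN2, if_neg hN1]
    obtain ⟨a1, a2, b1, b2⟩ := pvOuterA A (nn:Int) hN3 nn (by omega) le_rfl
    obtain ⟨c1, c2⟩ := pvOuterB A (nn:Int) hN3 nn (by omega) le_rfl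
    have e1 : ((nn:Int))-1 = ((nn-1:Nat):Int) := by omega
    have e2 : ((nn:Int))-2 = ((nn-2:Nat):Int) := by omega
    rw [e1, e2, PySem.List.pyGetD_natCast, PySem.List.pyGetD_natCast, PySem.List.pyGetD_natCast]
    rw [b2 nn (by omega), b2 (nn-1) (by omega), b2 (nn-2) (by omega)]
    rw [if_pos ⟨by omega, by omega⟩, if_pos ⟨by omega, by omega⟩, if_pos ⟨by omega, by omega⟩]
    -- B side
    have hlenE : (List.foldl (pvStepB A) (pvInitB A (nn:Int))
        (PySem.List.pyRange 3 ((nn:Int)+1) 1)).length = nn+1 := by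
      rw [c1]; omega
    rw [show max (1:Int) (((nn-2:Nat)):Int) = ((nn-2:Nat):Int) by omega,
        PySem.List.slice_toNat _ (show (0:Int) ≤ ((nn-2:Nat):Int) by omega) (show (0:Int) ≤ (nn:Int)+1 by omega),
        show ((((nn-2:Nat)):Int)).toNat = nn-2 by simp,
        show (((nn:Int))+1).toNat = nn+1 by omega]
    have hsl : List.take ((nn+1)-(nn-2)) (List.drop (nn-2) (List.foldl (pvStepB A) (pvInitB A (nn:Int))
          (PySem.List.pyRange 3 ((nn:Int)+1) 1)))
        = [pvEv A (nn-2), pvEv A (nn-1), pvEv A nn] := by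
      apply List.ext_getElem
      · simp [hlenE]; omega
      · intro i hi1 hi2
        have hi3 : i < 3 := by simpa using hi2
        rw [List.getElem_take, List.getElem_drop]
        have hv := c2 (nn-2+i) (by omega)
        rw [if_pos ⟨by omega, by omega⟩] at hv
        rw [List.getD_eq_getElem _ _ (by rw [hlenE]; omega)] at hv
        rw [hv]
        interval_cases i
        · simp
        · show _ = [pvEv A (nn-2), pvEv A (nn-1), pvEv A nn][1]
          simp only [List.getElem_cons_succ, List.getElem_cons_zero]
          congr 1; omega
        · show _ = [pvEv A (nn-2), pvEv A (nn-1), pvEv A nn][2]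
          simp only [List.getElem_cons_succ, List.getElem_cons_zero]
          congr 1; omega
    rw [hsl]
    show _ = max (max (max 0 (pvEv A (nn-2))) (pvEv A (nn-1))) (pvEv A nn)
    omega
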